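-- pv_equiv track=rewrite | github.com/mozilla/foundation-security-advisories | foundation_security_advisories/common.py | parse_md_front_matter
-- ===== SOURCE A (Python) =====
-- def parse_md_front_matter(lines):
--     """Return the YAML and MD sections.
--
--     :param: lines iterator
--     :return: str YAML, str Markdown
--     """
--     # fm_count: 0: init, 1: in YAML, 2: in Markdown
--     fm_count = 0
--     yaml_lines = []
--     md_lines = []
--     for line in lines:
--         # first line we care about is FM start
--         if fm_count < 2 and line.strip() == "---":
--             fm_count += 1
--             continue
--
--         if fm_count == 1:
--             yaml_lines.append(line)
--
--         if fm_count == 2: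
--             md_lines.append(line)
--
--     if fm_count < 2:
--         raise ValueError("Front Matter not found.")
--
--     return "".join(yaml_lines), "".join(md_lines)
-- ===== SOURCE B (Python) =====
-- def parse_md_front_matter(lines):
--     """Return the YAML and MD sections.
--
--     :param: lines iterator
--     :return: str YAML, str Markdown
--     """
--     it = iter(lines)
--     # Phase 1: skip everything up to the opening '---'.
--     for line in it:
--         if line.strip() == "---":
--             break
--     else:
--         raise ValueError("Front Matter not found.")
--     # Phase 2: collect YAML lines up to the closing '---'.
--     yaml_lines = []
--     for line in it:
--         if line.strip() == "---":
--             break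
--         yaml_lines.append(line)
--     else:
--         raise ValueError("Front Matter not found.")
--     # Phase 3: everything left is Markdown.
--     md_lines = list(it)
--     return "".join(yaml_lines), "".join(md_lines)
-- ===== Notes on version B (the rewrite author's own statement) =====
-- stated objective: simpler
-- what changed: Replaced the single flag-driven state-machine loop (fm_count 0/1/2 with per-line branch tests) by three sequential phases over one shared iterator: skip to the first '---', collect YAML until the second '---', then take the rest as Markdown; exhaustion is handled by for-else instead of a final counter check.
import Mathlib
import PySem

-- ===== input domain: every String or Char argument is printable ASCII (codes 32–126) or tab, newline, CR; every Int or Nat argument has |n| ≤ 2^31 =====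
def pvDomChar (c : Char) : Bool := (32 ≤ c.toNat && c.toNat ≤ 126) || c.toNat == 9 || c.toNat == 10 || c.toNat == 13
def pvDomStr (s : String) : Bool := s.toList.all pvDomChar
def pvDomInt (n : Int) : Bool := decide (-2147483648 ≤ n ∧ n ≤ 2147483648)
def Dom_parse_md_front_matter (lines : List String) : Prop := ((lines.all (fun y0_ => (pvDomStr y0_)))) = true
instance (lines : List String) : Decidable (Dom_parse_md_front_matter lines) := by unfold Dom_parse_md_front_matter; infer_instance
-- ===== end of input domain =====

-- B replaces A's flag-driven state-machine loop by three sequential phases over the same line stream (simpler decomposition; same cost).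

-- ===== PORT A =====
-- per-line body of A's loop: state = (fm_count, yaml_lines, md_lines)
def stepA (st : Int × List String × List String) (line : String) : Int × List String × List String :=
  if st.1 < 2 ∧ PySem.Str.strip line = "---" then (st.1 + 1, st.2.1, st.2.2)
  else (st.1,
        (if st.1 == 1 then st.2.1 ++ [line] else st.2.1),
        (if st.1 == 2 then st.2.2 ++ [line] else st.2.2))

def parse_md_front_matter (lines : List String) : String × String :=
  let st := lines.foldl stepA (0, [], [])
  if st.1 < 2 then ("", "")  -- Python raises ValueError here; excluded by Pre_
  else (PySem.Str.join "" st.2.1, PySem.Str.join "" st.2.2)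

-- ===== PORT B =====
-- phase 1: drop lines up to and including the first '---'; none = iterator exhausted (ValueError)
def findDelim : List String → Option (List String)
  | [] => none
  | l :: ls => if PySem.Str.strip l = "---" then some ls else findDelim ls

-- phase 2: collect YAML lines up to the second '---', returning them with the remainder; none = exhausted (ValueError)
def collectYaml : List String → Option (List String × List String)
  | [] => none
  | l :: ls =>
    if PySem.Str.strip l = "---" then some ([], ls)
    else match collectYaml ls with
      | none => none
      | some (ys, rest) => some (l :: ys, rest)

def parse_md_front_matter_alt (lines : List String) : String × String :=
  match findDelim lines with
  | none => ("", "")  -- Python raises ValueError here; excluded by Pre_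
  | some rest =>
    match collectYaml rest with
    | none => ("", "")  -- Python raises ValueError here; excluded by Pre_
    | some (ys, md) => (PySem.Str.join "" ys, PySem.Str.join "" md)

-- ===== PRECONDITION & SPEC =====
-- Pre_ excludes exactly the inputs with fewer than two '---' delimiter lines, on which Python A raises ValueError.
def Pre_parse_md_front_matter (lines : List String) : Prop :=
  2 ≤ lines.countP (fun l => PySem.Str.strip l = "---")
instance (lines : List String) : Decidable (Pre_parse_md_front_matter lines) := by unfold Pre_parse_md_front_matter; infer_instance
def pvWitness_parse_md_front_matter : List String := ["---", "a: 1\n", "---", "body\n"]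

def Spec_parse_md_front_matter (lines : List String) (out : String × String) : Prop := out = parse_md_front_matter_alt lines
instance (lines : List String) (out : String × String) : Decidable (Spec_parse_md_front_matter lines out) := by unfold Spec_parse_md_front_matter; infer_instance

-- ===== CLAIM (what is proved, stated in full; the proofs are below) =====
def Claim_equal_parse_md_front_matter : Prop := ∀ (lines : List String), Dom_parse_md_front_matter lines → Pre_parse_md_front_matter lines → Spec_parse_md_front_matter lines (parse_md_front_matter lines)

-- ===== LEMMAS AND PROOFS =====

-- once in Markdown state (fm_count = 2) A appends every remaining line
theorem foldA2 (ls : List String) (yl ml : List String) :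
    ls.foldl stepA (2, yl, ml) = (2, yl, ml ++ ls) := by
  induction ls generalizing ml with
  | nil => simp
  | cons l ls ih => simp [stepA, ih]

-- in YAML state (fm_count = 1) A behaves like B's phase 2 followed by phase 3
theorem foldA1 (ls : List String) (yl ml : List String) :
    ls.foldl stepA (1, yl, ml) =
      match collectYaml ls with
      | none => (1, yl ++ ls, ml)
      | some (ys, rest) => (2, yl ++ ys, ml ++ rest) := by
  induction ls generalizing yl with
  | nil => simp [collectYaml]
  | cons l ls ih =>
    by_cases h : PySem.Str.strip l = "---"
    · simp [collectYaml, h, stepA, foldA2]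
    · simp only [collectYaml, h, if_false, List.foldl_cons]
      have hst : stepA (1, yl, ml) l = (1, yl ++ [l], ml) := by simp [stepA, h]
      rw [hst, ih]
      cases hc : collectYaml ls with
      | none => simp
      | some p => cases p with | mk ys rest => simp

-- in the initial state (fm_count = 0) A skips lines exactly like B's phase 1
theorem foldA0 (ls : List String) :
    ls.foldl stepA (0, [], []) =
      match findDelim ls with
      | none => (0, [], [])
      | some rest => rest.foldl stepA (1, [], []) := by
  induction ls with
  | nil => simp [findDelim]
  | cons l ls ih =>
    by_cases h : PySem.Str.strip l = "---"
    · simp [findDelim, h, stepA]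
    · simp only [findDelim, h, if_false, List.foldl_cons]
      have hst : stepA (0, [], []) l = (0, [], []) := by simp [stepA, h]
      rw [hst, ih]

-- ===== VERDICT (by name: the statement is the Claim_ definition above) =====
theorem parse_md_front_matter_spec : Claim_equal_parse_md_front_matter := by
  intro lines _ _
  unfold Spec_parse_md_front_matter parse_md_front_matter parse_md_front_matter_alt
  rw [foldA0]
  cases hf : findDelim lines with
  | none => simp
  | some rest =>
    dsimp only
    rw [foldA1]
    cases hc : collectYaml rest with
    | none => simp
    | some p =>
      obtain ⟨ys, md⟩ := p
      simp
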